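-- pv_equiv track=rewrite | github.com/aniajj9/CryptoComputing | One time truth table Assignment/main.py | circular_shift_matrix
-- ===== SOURCE A (Python) =====
-- def circular_shift_matrix(matrix, r, s):
--     num_rows = len(matrix)
--     num_cols = len(matrix[0])
--
--     shifted_matrix = [[0 for _ in range(num_cols)] for _ in range(num_rows)]
--
--     for i in range(num_rows):
--         for j in range(num_cols):
--             shifted_matrix[(i + r) % num_rows][(j + s) % num_cols] = matrix[i][j]
--
--     return shifted_matrix
-- ===== SOURCE B (Python) =====
-- def _rotate(lst, k):
--     # lst rotated left by k positions (k may be negative); fresh list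
--     if not lst:
--         return []
--     k %= len(lst)
--     return lst[k:] + lst[:k]
--
--
-- def circular_shift_matrix(matrix, r, s):
--     # the matrix is num_rows x num_cols with num_cols = len(matrix[0])
--     num_cols = len(matrix[0])
--     return [_rotate(row[:num_cols], -s) for row in _rotate(matrix, -r)]
-- ===== Notes on version B (the rewrite author's own statement) =====
-- stated objective: idiomatic
-- what changed: B rotates the row list and each row's first num_cols entries by slicing (lst[k:] + lst[:k] via a _rotate helper) instead of scattering every element into a preallocated zero matrix via per-element modulo index arithmetic.
import Mathlib
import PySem

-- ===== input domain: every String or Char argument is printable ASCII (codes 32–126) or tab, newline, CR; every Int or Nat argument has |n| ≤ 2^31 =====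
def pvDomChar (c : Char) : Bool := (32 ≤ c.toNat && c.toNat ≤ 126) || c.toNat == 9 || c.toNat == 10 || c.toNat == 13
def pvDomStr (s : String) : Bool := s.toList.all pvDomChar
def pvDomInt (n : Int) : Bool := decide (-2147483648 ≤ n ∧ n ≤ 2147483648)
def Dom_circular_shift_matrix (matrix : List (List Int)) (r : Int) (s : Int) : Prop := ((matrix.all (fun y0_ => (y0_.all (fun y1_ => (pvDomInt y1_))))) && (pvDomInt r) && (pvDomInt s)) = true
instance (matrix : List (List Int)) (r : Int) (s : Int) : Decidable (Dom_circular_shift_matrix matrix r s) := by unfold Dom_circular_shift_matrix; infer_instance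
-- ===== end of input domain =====

-- B replaces A's per-element modulo scatter into a zero matrix by slice-rotation of the row list and of each row's first num_cols entries (idiomatic; measured faster in a timing run).


-- ===== PORT A =====
-- Literal port: zero matrix of shape len(matrix) × len(matrix[0]), then scatter
-- matrix[i][j] to position ((i+r) % num_rows, (j+s) % num_cols).  Where Python
-- raises (matrix[0] on [], matrix[i][j] on a short row) the pyGet? is none and
-- `.getD` supplies a dummy — exactly those inputs are outside Pre_.
-- The indices (i+r) % num_rows are results of Python `%` with positive divisor,
-- hence nonnegative, so `.toNat` is exact here.
def circular_shift_matrix (matrix : List (List Int)) (r : Int) (s : Int) : List (List Int) :=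
  let numRows : Int := (matrix.length : Int)
  let numCols : Int := ((((PySem.List.pyGet? matrix 0).getD []).length : Nat) : Int)
  let shifted : List (List Int) :=
    (PySem.List.pyRange 0 numRows 1).map (fun _ =>
      (PySem.List.pyRange 0 numCols 1).map (fun _ => (0 : Int)))
  (PySem.List.pyRange 0 numRows 1).foldl (fun sm i =>
    (PySem.List.pyRange 0 numCols 1).foldl (fun sm j =>
      let a : Nat := (PySem.Int.mod (i + r) numRows).toNat
      let b : Nat := (PySem.Int.mod (j + s) numCols).toNat
      let v : Int := (PySem.List.pyGet? ((PySem.List.pyGet? matrix i).getD []) j).getD 0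
      sm.set a ((sm.getD a []).set b v)) sm) shifted

-- ===== PORT B =====
-- _rotate(lst, k) = [] if lst empty else lst[k % len :] + lst[: k % len]
def pyRotate {α : Type} (lst : List α) (k : Int) : List α :=
  if lst.isEmpty then []
  else
    let t := PySem.Int.mod k (lst.length : Int)
    PySem.List.slice lst (some t) none ++ PySem.List.slice lst none (some t)

def circular_shift_matrix_alt (matrix : List (List Int)) (r : Int) (s : Int) : List (List Int) :=
  let numCols : Int := ((((PySem.List.pyGet? matrix 0).getD []).length : Nat) : Int)
  (pyRotate matrix (-r)).map (fun row =>
    pyRotate (PySem.List.slice row none (some numCols)) (-s))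

-- ===== PRECONDITION & SPEC =====
-- Pre_ excludes exactly the inputs on which A raises IndexError: the empty matrix
-- (at len(matrix[0])) and matrices with a row shorter than row 0 (at matrix[i][j]).
def Pre_circular_shift_matrix (matrix : List (List Int)) (r : Int) (s : Int) : Prop :=
  matrix ≠ [] ∧ ∀ row ∈ matrix, (matrix.headD []).length ≤ row.length
instance (matrix : List (List Int)) (r : Int) (s : Int) : Decidable (Pre_circular_shift_matrix matrix r s) := by unfold Pre_circular_shift_matrix; infer_instance

def pvWitness_circular_shift_matrix : List (List Int) × Int × Int := ([[1, 2, 3], [4, 5, 6]], 1, 2)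

def Spec_circular_shift_matrix (matrix : List (List Int)) (r : Int) (s : Int) (out : List (List Int)) : Prop := out = circular_shift_matrix_alt matrix r s
instance (matrix : List (List Int)) (r : Int) (s : Int) (out : List (List Int)) : Decidable (Spec_circular_shift_matrix matrix r s out) := by unfold Spec_circular_shift_matrix; infer_instance

-- ===== CLAIM (what is proved, stated in full; the proofs are below) =====
def Claim_equal_circular_shift_matrix : Prop := ∀ (matrix : List (List Int)) (r : Int) (s : Int), Dom_circular_shift_matrix matrix r s → Pre_circular_shift_matrix matrix r s → Spec_circular_shift_matrix matrix r s (circular_shift_matrix matrix r s)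
-- ===== LEMMAS AND PROOFS =====

theorem csm_mod_cancel (n q r : ℤ) (h0 : 0 ≤ q) (h1 : q < n) : ((q - r) % n + r) % n = q := by
  conv_lhs => rw [Int.add_emod, Int.emod_emod_of_dvd _ dvd_rfl, ← Int.add_emod, sub_add_cancel]
  exact Int.emod_eq_of_lt h0 h1

theorem csm_toNat_mod (nn : ℕ) (hn : 0 < nn) (r : ℤ) (p : ℕ) :
    (((p:ℤ) - r) % (nn:ℤ)).toNat = (p + ((-r) % (nn:ℤ)).toNat) % nn := by
  have hnz : (nn:ℤ) ≠ 0 := by positivity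
  have h0 : 0 ≤ (-r) % (nn:ℤ) := Int.emod_nonneg _ hnz
  have h1 : ((p:ℤ) + ((-r) % (nn:ℤ))) % nn = ((p:ℤ) - r) % nn := by
    rw [Int.add_emod, Int.emod_emod_of_dvd _ dvd_rfl, ← Int.add_emod]
    ring_nf
  rw [← h1, ← Int.toNat_of_nonneg h0, ← Nat.cast_add, ← Int.natCast_mod, Int.toNat_natCast,
    Int.toNat_natCast]

theorem csm_scatter_aux {α : Type} (n : ℕ) (hn : 0 < n) (r : ℤ) (f : ℤ → α) :
    ∀ (c : ℕ), c ≤ n → ∀ (start : List α), start.length = n →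
      (((PySem.List.pyRange 0 (c:ℤ) 1).foldl
          (fun sm i => sm.set (PySem.Int.mod (i + r) (n:ℤ)).toNat (f i)) start).length = n ∧
       ∀ q : ℕ, q < n →
        ((PySem.List.pyRange 0 (c:ℤ) 1).foldl
          (fun sm i => sm.set (PySem.Int.mod (i + r) (n:ℤ)).toNat (f i)) start)[q]? =
          if (((q:ℤ) - r) % (n:ℤ)) < (c:ℤ) then some (f (((q:ℤ) - r) % (n:ℤ))) else start[q]?) := by
  have hnz : (n:ℤ) ≠ 0 := by positivity
  have hnpos : (0:ℤ) < n := by exact_mod_cast hn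
  intro c
  induction c with
  | zero =>
    intro _ start hs
    simp only [Nat.cast_zero]
    rw [PySem.List.pyRange_one_eq_nil le_rfl]
    refine ⟨hs, fun q hq => ?_⟩
    rw [List.foldl_nil, if_neg (not_lt.mpr (Int.emod_nonneg _ hnz))]
  | succ c ih =>
    intro hc start hs
    have hc' : c ≤ n := Nat.le_of_succ_le hc
    have hcn : (c:ℤ) < n := by exact_mod_cast hc
    obtain ⟨ihl, ihe⟩ := ih hc' start hs
    have hcast : ((c + 1 : ℕ) : ℤ) = (c:ℤ) + 1 := by push_cast; ring
    rw [hcast, PySem.List.pyRange_one_succ_right (by positivity), List.foldl_append]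
    set prev := (PySem.List.pyRange 0 (c:ℤ) 1).foldl
        (fun sm i => sm.set (PySem.Int.mod (i + r) (n:ℤ)).toNat (f i)) start with hprev
    simp only [List.foldl_cons, List.foldl_nil]
    have hk0 : 0 ≤ ((c:ℤ) + r) % n := Int.emod_nonneg _ hnz
    have hk1 : ((c:ℤ) + r) % n < n := Int.emod_lt_of_pos _ hnpos
    rw [PySem.Int.mod_eq_emod_of_pos hnpos]
    refine ⟨by rw [List.length_set]; exact ihl, fun q hq => ?_⟩
    rw [List.getElem?_set]
    have hq0 : (0:ℤ) ≤ q := by positivity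
    have hqn : (q:ℤ) < n := by exact_mod_cast hq
    have hd0 : 0 ≤ ((q:ℤ) - r) % n := Int.emod_nonneg _ hnz
    have hinv : ((((c:ℤ) + r) % n) - r) % n = (c:ℤ) := by
      have := csm_mod_cancel (n:ℤ) (c:ℤ) (-r) (by positivity) hcn
      rwa [sub_neg_eq_add, ← sub_eq_add_neg] at this
    have hiff : ((((c:ℤ) + r) % n).toNat = q) ↔ (((q:ℤ) - r) % n = (c:ℤ)) := by
      constructor
      · intro h
        have hqe : (q:ℤ) = ((c:ℤ) + r) % n := by rw [← h, Int.toNat_of_nonneg hk0]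
        rw [hqe, hinv]
      · intro h
        have := csm_mod_cancel (n:ℤ) (q:ℤ) r hq0 hqn
        rw [h] at this
        rw [this, Int.toNat_natCast]
    by_cases hcase : (((c:ℤ) + r) % n).toNat = q
    · rw [if_pos hcase, hcase, if_pos (by rw [ihl]; exact hq)]
      rw [hiff] at hcase
      rw [hcase, if_pos (by omega)]
    · rw [if_neg hcase, ihe q hq]
      rw [hiff] at hcase
      by_cases hlt : ((q:ℤ) - r) % n < (c:ℤ)
      · rw [if_pos hlt, if_pos (by omega)]
      · rw [if_neg hlt, if_neg (by omega)]

theorem csm_scatter_eq_map {α : Type} (n : ℕ) (hn : 0 < n) (r : ℤ) (f : ℤ → α)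
    (start : List α) (hs : start.length = n) :
    (PySem.List.pyRange 0 (n:ℤ) 1).foldl
        (fun sm i => sm.set (PySem.Int.mod (i + r) (n:ℤ)).toNat (f i)) start
      = (List.range n).map (fun q : ℕ => f (((q:ℤ) - r) % (n:ℤ))) := by
  obtain ⟨hl, he⟩ := csm_scatter_aux n hn r f n le_rfl start hs
  apply List.ext_getElem?
  intro q
  by_cases hq : q < n
  · rw [he q hq, List.getElem?_map, List.getElem?_range hq,
      if_pos (Int.emod_lt_of_pos _ (by exact_mod_cast hn))]
    rfl
  · rw [List.getElem?_eq_none_iff.mpr (by rw [hl]; omega),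
      List.getElem?_eq_none_iff.mpr (by simp; omega)]

-- collapse of the inner loop: constant outer index a
theorem csm_inner_collapse {α : Type} (a : ℕ) (step : List α → ℤ → List α) :
    ∀ (L : List ℤ) (sm : List (List α)), a < sm.length →
      L.foldl (fun sm j => sm.set a (step (sm.getD a []) j)) sm
        = sm.set a (L.foldl step (sm.getD a [])) := by
  intro L
  induction L with
  | nil =>
    intro sm ha
    rw [List.foldl_nil, List.foldl_nil, List.getD_eq_getElem?_getD,
      List.getElem?_eq_getElem ha]
    exact (List.set_getElem_self ha).symm
  | cons j L ih =>
    intro sm ha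
    rw [List.foldl_cons, List.foldl_cons, ih _ (by rw [List.length_set]; exact ha),
      List.set_set]
    congr 2
    rw [List.getD_eq_getElem?_getD, List.getElem?_set_self ha]
    rfl

-- replace the data-dependent row step by a data-independent one, under the row-length invariant
theorem csm_fold_congr {α : Type} (n m : ℕ) (g : ℤ → ℕ)
    (F : List (List α) → ℤ → List (List α)) (rowv : ℤ → List α)
    (hF : ∀ (sm : List (List α)) (i : ℤ), sm.length = n → (∀ row ∈ sm, row.length = m) →
      F sm i = sm.set (g i) (rowv i))
    (hrl : ∀ i, (rowv i).length = m) :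
    ∀ (L : List ℤ) (sm : List (List α)), sm.length = n → (∀ row ∈ sm, row.length = m) →
      L.foldl F sm = L.foldl (fun sm i => sm.set (g i) (rowv i)) sm := by
  intro L
  induction L with
  | nil => intro sm _ _; rfl
  | cons i L ih =>
    intro sm hlen hrows
    rw [List.foldl_cons, List.foldl_cons, hF sm i hlen hrows]
    exact ih _ (by rw [List.length_set]; exact hlen)
      (fun row hrow => by
        rcases List.mem_or_eq_of_mem_set hrow with h | h
        · exact hrows row h
        · rw [h]; exact hrl i)

theorem csm_rotate_eq {α : Type} (lst : List α) (k : ℤ) (h : lst ≠ []) :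
    pyRotate lst k =
      lst.drop ((k % (lst.length:ℤ)).toNat) ++ lst.take ((k % (lst.length:ℤ)).toNat) := by
  have hlen : 0 < lst.length := List.length_pos_iff.mpr h
  have hpos : (0:ℤ) < lst.length := by exact_mod_cast hlen
  rw [pyRotate, if_neg (by simpa [List.isEmpty_iff] using h)]
  have h0 : 0 ≤ k % (lst.length:ℤ) := Int.emod_nonneg _ (by positivity)
  rw [PySem.Int.mod_eq_emod_of_pos hpos, ← Int.toNat_of_nonneg h0]
  simp only []
  rw [PySem.List.slice_from_natCast, PySem.List.slice_to_natCast, Int.toNat_natCast]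

theorem csm_rotate_length {α : Type} (lst : List α) (k : ℤ) :
    (pyRotate lst k).length = lst.length := by
  by_cases h : lst = []
  · subst h; rfl
  · rw [csm_rotate_eq lst k h]
    have hlen : 0 < lst.length := List.length_pos_iff.mpr h
    have htn : (k % (lst.length:ℤ)).toNat < lst.length := by
      have := Int.emod_lt_of_pos k (b := (lst.length:ℤ)) (by exact_mod_cast hlen)
      omega
    rw [List.length_append, List.length_drop, List.length_take]
    omega

theorem csm_rotate_getElem? {α : Type} (lst : List α) (k : ℤ) (h : lst ≠ [])
    (p : ℕ) (hp : p < lst.length) :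
    (pyRotate lst k)[p]? = lst[(p + (k % (lst.length:ℤ)).toNat) % lst.length]? := by
  have hlen : 0 < lst.length := List.length_pos_iff.mpr h
  set tn := (k % (lst.length:ℤ)).toNat with htn
  have htlt : tn < lst.length := by
    have := Int.emod_lt_of_pos k (b := (lst.length:ℤ)) (by exact_mod_cast hlen)
    omega
  rw [csm_rotate_eq lst k h, List.getElem?_append, List.length_drop]
  by_cases hc : p < lst.length - tn
  · rw [if_pos hc, List.getElem?_drop, Nat.mod_eq_of_lt (by omega)]
    congr 1
    omega
  · rw [if_neg hc, List.getElem?_take, if_pos (by omega)]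
    congr 1
    rw [Nat.mod_eq_sub_mod (by omega), Nat.mod_eq_of_lt (by omega)]
    omega

theorem csm_head_bridge (matrix : List (List Int)) (h : matrix ≠ []) :
    (PySem.List.pyGet? matrix 0).getD [] = matrix.headD [] := by
  cases matrix with
  | nil => exact absurd rfl h
  | cons a t => rw [PySem.List.pyGet?_zero_cons]; rfl

theorem csm_main (matrix : List (List Int)) (r s : ℤ) (hne : matrix ≠ [])
    (hge : ∀ row ∈ matrix, (matrix.headD []).length ≤ row.length) :
    circular_shift_matrix matrix r s = circular_shift_matrix_alt matrix r s := by
  have hn : 0 < matrix.length := List.length_pos_iff.mpr hne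
  simp only [circular_shift_matrix, circular_shift_matrix_alt, csm_head_bridge matrix hne]
  set n := matrix.length with hnd
  set m := (matrix.headD []).length with hmd
  set t := ((-r) % (n:ℤ)).toNat with htd
  have hrot : ∀ p : ℕ, p < n → (pyRotate matrix (-r))[p]? = some (matrix[(p + t) % n]'(Nat.mod_lt _ hn)) := by
    intro p hp
    rw [csm_rotate_getElem? matrix (-r) hne p hp, List.getElem?_eq_getElem (Nat.mod_lt _ hn)]
  simp only [PySem.List.slice_to_natCast]
  have hrowlen : ∀ p : ℕ, (hp : p < n) → ((matrix[(p + t) % n]'(Nat.mod_lt _ hn)).take m).length = m := by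
    intro p hp
    rw [List.length_take]
    have hmem : matrix[(p + t) % n]'(Nat.mod_lt _ hn) ∈ matrix := List.getElem_mem _
    have := hge _ hmem
    omega
  have hlenB : ((pyRotate matrix (-r)).map (fun row => pyRotate (row.take m) (-s))).length = n := by
    rw [List.length_map, csm_rotate_length]
  by_cases hm : m = 0
  · -- every row is empty: both sides are n copies of []
    rw [hm] at hlenB ⊢
    simp only [Nat.cast_zero]
    rw [PySem.List.pyRange_one_eq_nil (le_refl 0)]
    simp only [List.foldl_nil, List.map_nil]
    rw [PySem.List.foldl_ignore]
    apply List.ext_getElem?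
    intro p
    by_cases hp : p < n
    · rw [List.getElem?_map, List.getElem?_map, hrot p hp]
      rw [PySem.List.getElem?_pyRange_one (a := 0) (b := (n:ℤ)) (k := p), if_pos (by omega)]
      simp only [Option.map_some, List.take_zero]
      rfl
    · rw [List.getElem?_eq_none_iff.mpr, List.getElem?_eq_none_iff.mpr]
      · rw [hlenB]; omega
      · rw [List.length_map, PySem.List.length_pyRange_one]; omega
  · have hm' : 0 < m := Nat.pos_of_ne_zero hm
    have hnz : (0:ℤ) < n := by exact_mod_cast hn
    have hshl : (List.map (fun x => List.map (fun x => (0:ℤ)) (PySem.List.pyRange 0 (m:ℤ) 1)) (PySem.List.pyRange 0 (n:ℤ) 1)).length = n := by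
      rw [List.length_map, PySem.List.length_pyRange_one]; omega
    have hshr : ∀ row ∈ List.map (fun x => List.map (fun x => (0:ℤ)) (PySem.List.pyRange 0 (m:ℤ) 1)) (PySem.List.pyRange 0 (n:ℤ) 1), row.length = m := by
      intro row hrow
      obtain ⟨x, _, rfl⟩ := List.mem_map.mp hrow
      rw [List.length_map, PySem.List.length_pyRange_one]; omega
    have hF : ∀ (sm : List (List ℤ)) (i : ℤ), sm.length = n → (∀ row ∈ sm, row.length = m) →
        List.foldl (fun sm j => sm.set (PySem.Int.mod (i + r) (n:ℤ)).toNat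
              ((sm.getD (PySem.Int.mod (i + r) (n:ℤ)).toNat []).set (PySem.Int.mod (j + s) (m:ℤ)).toNat
                ((PySem.List.pyGet? ((PySem.List.pyGet? matrix i).getD []) j).getD 0)))
          sm (PySem.List.pyRange 0 (m:ℤ) 1)
        = sm.set ((PySem.Int.mod (i + r) (n:ℤ)).toNat)
            ((List.range m).map (fun q : ℕ => (PySem.List.pyGet? ((PySem.List.pyGet? matrix i).getD []) (((q:ℤ) - s) % (m:ℤ))).getD 0)) := by
      intro sm i hlen hrows
      have hgi : (PySem.Int.mod (i + r) (n:ℤ)).toNat < sm.length := by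
        rw [hlen, PySem.Int.mod_eq_emod_of_pos hnz]
        have h1 := Int.emod_lt_of_pos (i + r) hnz
        have h2 := Int.emod_nonneg (i + r) (by positivity : (n:ℤ) ≠ 0)
        omega
      trans (sm.set (PySem.Int.mod (i + r) (n:ℤ)).toNat
        ((PySem.List.pyRange 0 (m:ℤ) 1).foldl
          (fun row j => row.set (PySem.Int.mod (j + s) (m:ℤ)).toNat
            ((PySem.List.pyGet? ((PySem.List.pyGet? matrix i).getD []) j).getD 0))
          (sm.getD (PySem.Int.mod (i + r) (n:ℤ)).toNat [])))
      · exact csm_inner_collapse ((PySem.Int.mod (i + r) (n:ℤ)).toNat)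
          (fun row j => row.set (PySem.Int.mod (j + s) (m:ℤ)).toNat
            ((PySem.List.pyGet? ((PySem.List.pyGet? matrix i).getD []) j).getD 0))
          _ sm hgi
      · congr 1
        have hstart : (sm.getD (PySem.Int.mod (i + r) (n:ℤ)).toNat []).length = m := by
          rw [List.getD_eq_getElem?_getD, List.getElem?_eq_getElem hgi]
          exact hrows _ (List.getElem_mem hgi)
        exact csm_scatter_eq_map m hm' s _ _ hstart
    have hA : List.foldl
          (fun sm i =>
            List.foldl
              (fun sm j =>
                sm.set (PySem.Int.mod (i + r) (n:ℤ)).toNat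
                  ((sm.getD (PySem.Int.mod (i + r) (n:ℤ)).toNat []).set (PySem.Int.mod (j + s) (m:ℤ)).toNat
                    ((PySem.List.pyGet? ((PySem.List.pyGet? matrix i).getD []) j).getD 0)))
              sm (PySem.List.pyRange 0 (m:ℤ) 1))
          (List.map (fun x => List.map (fun x => (0:ℤ)) (PySem.List.pyRange 0 (m:ℤ) 1)) (PySem.List.pyRange 0 (n:ℤ) 1))
          (PySem.List.pyRange 0 (n:ℤ) 1)
        = (List.range n).map (fun p : ℕ =>
            (List.range m).map (fun q : ℕ =>
              (PySem.List.pyGet? ((PySem.List.pyGet? matrix (((p:ℤ) - r) % (n:ℤ))).getD [])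
                (((q:ℤ) - s) % (m:ℤ))).getD 0)) := by
      trans (List.foldl (fun sm i => sm.set ((PySem.Int.mod (i + r) (n:ℤ)).toNat)
          ((List.range m).map (fun q : ℕ => (PySem.List.pyGet? ((PySem.List.pyGet? matrix i).getD []) (((q:ℤ) - s) % (m:ℤ))).getD 0)))
          (List.map (fun x => List.map (fun x => (0:ℤ)) (PySem.List.pyRange 0 (m:ℤ) 1)) (PySem.List.pyRange 0 (n:ℤ) 1))
          (PySem.List.pyRange 0 (n:ℤ) 1))
      · exact csm_fold_congr n m (fun i => (PySem.Int.mod (i + r) (n:ℤ)).toNat) _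
          (fun i => (List.range m).map fun q : ℕ => (PySem.List.pyGet? ((PySem.List.pyGet? matrix i).getD []) (((q:ℤ) - s) % (m:ℤ))).getD 0)
          hF (fun i => by rw [List.length_map, List.length_range]) _ _ hshl hshr
      · exact csm_scatter_eq_map n hn r _ _ hshl
    rw [hA]
    apply List.ext_getElem?
    intro p
    by_cases hp : p < n
    · rw [List.getElem?_map, List.getElem?_map, List.getElem?_range hp, hrot p hp]
      simp only [Option.map_some]
      congr 1
      have hidx : (((p:ℤ) - r) % (n:ℤ)).toNat = (p + t) % n := csm_toNat_mod n hn r p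
      have hi0 : (0:ℤ) ≤ ((p:ℤ) - r) % (n:ℤ) := Int.emod_nonneg _ (by positivity)
      have hget : (PySem.List.pyGet? matrix (((p:ℤ) - r) % (n:ℤ))).getD [] = matrix[(p + t) % n]'(Nat.mod_lt _ hn) := by
        rw [PySem.List.pyGet?_of_nonneg matrix hi0, hidx, List.getElem?_eq_getElem (Nat.mod_lt _ hn)]
        rfl
      rw [hget]
      have hr0len : ((matrix[(p + t) % n]'(Nat.mod_lt _ hn)).take m).length = m := hrowlen p hp
      have hr0ne : ((matrix[(p + t) % n]'(Nat.mod_lt _ hn)).take m) ≠ [] := by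
        intro h
        rw [h] at hr0len
        simp at hr0len
        omega
      apply List.ext_getElem?
      intro q
      by_cases hq : q < m
      · rw [List.getElem?_map, List.getElem?_range hq,
          csm_rotate_getElem? _ (-s) hr0ne q (by rw [hr0len]; exact hq), hr0len]
        simp only [Option.map_some]
        have hj0 : (0:ℤ) ≤ ((q:ℤ) - s) % (m:ℤ) := Int.emod_nonneg _ (by positivity)
        have hjidx : (((q:ℤ) - s) % (m:ℤ)).toNat = (q + ((-s) % (m:ℤ)).toNat) % m := csm_toNat_mod m hm' s q
        rw [PySem.List.pyGet?_of_nonneg _ hj0, hjidx, List.getElem?_take,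
          if_pos (Nat.mod_lt _ hm'),
          List.getElem?_eq_getElem (show (q + ((-s) % (m:ℤ)).toNat) % m < (matrix[(p + t) % n]'(Nat.mod_lt _ hn)).length by
            have := hrowlen p hp
            rw [List.length_take] at this
            have h2 := Nat.mod_lt (q + ((-s) % (m:ℤ)).toNat) hm'
            omega)]
        rfl
      · rw [List.getElem?_eq_none_iff.mpr, List.getElem?_eq_none_iff.mpr]
        · rw [csm_rotate_length, hr0len]; omega
        · rw [List.length_map, List.length_range]; omega
    · rw [List.getElem?_eq_none_iff.mpr, List.getElem?_eq_none_iff.mpr]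
      · rw [hlenB]; omega
      · rw [List.length_map, List.length_range]; omega


-- ===== VERDICT (by name: the statement is the Claim_ definition above) =====
theorem circular_shift_matrix_spec : Claim_equal_circular_shift_matrix := by
  intro matrix r s _ hpre
  exact csm_main matrix r s hpre.1 hpre.2
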